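-- pv_equiv track=rewrite | github.com/siddharth559/SA-Smart-Assistant | any_file_searcher.py | compr
-- ===== SOURCE A (Python) =====
-- def compr(x,y):
--     #x is to be compared with y
--     val=0
--     for i in range(0,len(x)//2-1):
--         if x in y:
--             val=1
--         x=x[0:len(x)-1]
--
--     else:
--         if val==1:
--             return True
--         else:
--             return False
-- ===== SOURCE B (Python) =====
-- def compr(x, y):
--     # Substring containment is monotone under taking prefixes, so the loop in A
--     # succeeds iff the SHORTEST tested prefix of x occurs in y.
--     k = len(x) // 2 - 1
--     if k <= 0:
--         return False
--     return x[:len(x) - k + 1] in y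
-- ===== Notes on version B (the rewrite author's own statement) =====
-- stated objective: faster
-- what changed: A runs a loop doing len(x)//2-1 substring checks on shrinking copies of x; B exploits that substring containment is monotone under taking prefixes and does a single containment check of the shortest tested prefix (returning False when the loop would run zero times).
import Mathlib
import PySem

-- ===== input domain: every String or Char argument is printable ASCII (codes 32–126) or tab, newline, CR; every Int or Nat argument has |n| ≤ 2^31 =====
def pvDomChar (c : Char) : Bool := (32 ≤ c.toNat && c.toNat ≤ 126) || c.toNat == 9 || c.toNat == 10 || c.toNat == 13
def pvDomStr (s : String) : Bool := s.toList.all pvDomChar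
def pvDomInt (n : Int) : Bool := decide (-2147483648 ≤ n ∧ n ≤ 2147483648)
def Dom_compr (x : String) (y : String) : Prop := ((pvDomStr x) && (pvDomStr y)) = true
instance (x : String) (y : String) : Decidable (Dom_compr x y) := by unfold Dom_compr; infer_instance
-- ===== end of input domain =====

-- B replaces A's loop of substring checks on shrinking copies of x by one containment
-- check of the shortest tested prefix (containment is monotone under taking prefixes).

-- ===== PORT A =====
-- loop body of A: 'if x in y: val = 1' then 'x = x[0:len(x)-1]'; the loop variable i is unused
def comprStep (y : String) (st : Int × String) (_ : Int) : Int × String :=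
  ((if PySem.Str.isIn st.2 y then 1 else st.1),
   PySem.Str.slice st.2 (some 0) (some ((PySem.Str.len st.2 : Int) - 1)))

def compr (x : String) (y : String) : Bool :=
  let st := (PySem.List.pyRange 0 (PySem.Int.floordiv (PySem.Str.len x : Int) 2 - 1) 1).foldl
    (comprStep y) (0, x)
  if st.1 = 1 then true else false

-- ===== PORT B =====
def compr_alt (x : String) (y : String) : Bool :=
  let k : Int := PySem.Int.floordiv (PySem.Str.len x : Int) 2 - 1
  if k ≤ 0 then false
  else PySem.Str.isIn (PySem.Str.slice x none (some ((PySem.Str.len x : Int) - k + 1))) y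

-- ===== PRECONDITION & SPEC =====
def Spec_compr (x : String) (y : String) (out : Bool) : Prop := out = compr_alt x y
instance (x : String) (y : String) (out : Bool) : Decidable (Spec_compr x y out) := by unfold Spec_compr; infer_instance

-- ===== CLAIM (what is proved, stated in full; the proofs are below) =====
def Claim_equal_compr : Prop := ∀ (x : String) (y : String), Dom_compr x y → Spec_compr x y (compr x y)

-- ===== LEMMAS AND PROOFS =====

lemma ite_tf_eq_true (c : Prop) [Decidable c] :
    ((if c then true else false) = true) ↔ c := by
  by_cases h : c <;> simp [h]

-- x[0:len(x)-1] drops the last character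
lemma slice_pred (cs : List Char) :
    PySem.List.slice cs none (some ((cs.length : Int) - 1)) = cs.dropLast := by
  cases cs with
  | nil => simpa using PySem.List.slice_to_neg_one ([] : List Char)
  | cons c cs' =>
      have h : ((c :: cs').length : Int) - 1 = ((cs'.length : Nat) : Int) := by simp
      rw [h, PySem.List.slice_to_natCast, List.dropLast_eq_take]
      simp

lemma slice_pred' (s : String) :
    PySem.List.slice s.toList none (some ((s.length : Int) - 1)) = s.toList.dropLast := by
  have h : s.length = s.toList.length := String.length_toList.symm
  rw [h]
  exact slice_pred s.toList

lemma toList_comprStep (y : String) (st : Int × String) (i : Int) :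
    ((comprStep y st i).2).toList = st.2.toList.dropLast := by
  show (PySem.Str.slice st.2 (some 0) (some ((PySem.Str.len st.2 : Int) - 1))).toList
      = st.2.toList.dropLast
  simp [slice_pred']

-- containment in y is monotone under shortening a prefix
lemma isIn_take_mono (cs ys : List Char) {a b : Nat} (hba : b ≤ a)
    (h : PySem.Chars.isIn (cs.take a) ys = true) :
    PySem.Chars.isIn (cs.take b) ys = true := by
  rw [PySem.Chars.isIn_iff_infix] at h ⊢
  have hpre : cs.take b <+: cs.take a := by
    have := List.take_prefix b (cs.take a)
    simpa [List.take_take, Nat.min_eq_left hba] using this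
  exact hpre.isInfix.trans h

-- characterisation of A's loop: val ends up 1 iff it started 1 or some tested prefix occurs in y
lemma foldA (y : String) (l : List Int) (s : String) (v : Int) :
    ((l.foldl (comprStep y) (v, s)).1 = 1) ↔
      (v = 1 ∨ ∃ j < l.length,
        PySem.Chars.isIn (s.toList.take (s.toList.length - j)) y.toList = true) := by
  induction l generalizing s v with
  | nil => simp
  | cons i l ih =>
    rw [List.foldl_cons]
    have hst : comprStep y (v, s) i =
        ((comprStep y (v, s) i).1, (comprStep y (v, s) i).2) := rfl
    rw [hst, ih]
    have hs' : ((comprStep y (v, s) i).2).toList = s.toList.dropLast :=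
      toList_comprStep y (v, s) i
    have hv' : (comprStep y (v, s) i).1
        = if PySem.Chars.isIn s.toList y.toList = true then 1 else v := by
      simp [comprStep]
    have htake : ∀ j : Nat, s.toList.dropLast.take (s.toList.dropLast.length - j)
        = s.toList.take (s.toList.length - (j + 1)) := by
      intro j
      rw [List.length_dropLast, List.dropLast_eq_take, List.take_take]
      congr 1
      omega
    rw [hv', hs']
    simp only [List.length_cons]
    constructor
    · rintro (h1 | ⟨j, hj, hin⟩)
      · by_cases hy : PySem.Chars.isIn s.toList y.toList = true
        · right
          refine ⟨0, by omega, ?_⟩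
          rw [Nat.sub_zero, List.take_length]
          exact hy
        · rw [if_neg hy] at h1
          exact Or.inl h1
      · right
        rw [htake] at hin
        exact ⟨j + 1, by omega, hin⟩
    · rintro (h1 | ⟨j, hj, hin⟩)
      · left
        rw [h1]
        split <;> rfl
      · cases j with
        | zero =>
          left
          rw [Nat.sub_zero, List.take_length] at hin
          rw [if_pos hin]
        | succ j' =>
          right
          refine ⟨j', by omega, ?_⟩
          rw [htake]
          exact hin

lemma floordiv_two_nat (n : Nat) :
    PySem.Int.floordiv (n : Int) 2 = ((n / 2 : Nat) : Int) := by
  unfold PySem.Int.floordiv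
  rw [Int.fdiv_eq_ediv]
  have : (0 : Int) ≤ 2 := by norm_num
  simp [this]

-- ===== VERDICT (by name: the statement is the Claim_ definition above) =====
theorem compr_spec : Claim_equal_compr := by
  unfold Claim_equal_compr Spec_compr
  intro x y _
  rw [Bool.eq_iff_iff]
  unfold compr compr_alt
  have hl : (PySem.Str.len x : Int) = ((x.toList.length : Nat) : Int) := by simp
  simp only [hl, floordiv_two_nat]
  by_cases hk : x.toList.length / 2 ≤ 1
  · rw [PySem.List.pyRange_one_eq_nil (by omega : ((x.toList.length / 2 : Nat) : Int) - 1 ≤ 0)]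
    rw [if_pos (by omega : ((x.toList.length / 2 : Nat) : Int) - 1 ≤ 0)]
    simp
  · rw [if_neg (by omega : ¬ (((x.toList.length / 2 : Nat) : Int) - 1 ≤ 0))]
    rw [ite_tf_eq_true, foldA, PySem.List.length_pyRange_one]
    have hKn : ((((x.toList.length / 2 : Nat) : Int) - 1) - 0).toNat
        = x.toList.length / 2 - 1 := by omega
    rw [hKn]
    have hb : ((x.toList.length : Int) - (((x.toList.length / 2 : Nat) : Int) - 1) + 1)
        = (((x.toList.length - (x.toList.length / 2 - 1) + 1 : Nat)) : Int) := by omega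
    rw [hb]
    have hslice : ∀ b : Nat, PySem.Str.isIn
        (PySem.Str.slice x none (some ((b : Nat) : Int))) y
        = PySem.Chars.isIn (x.toList.take b) y.toList := by
      intro b
      simp only [PySem.Str.isIn_eq, PySem.Str.toList_slice, PySem.Chars.slice_eq_listSlice,
        PySem.List.slice_to_natCast]
    rw [hslice]
    constructor
    · rintro (h0 | ⟨j, hj, hin⟩)
      · exact absurd h0 (by norm_num)
      · exact isIn_take_mono x.toList y.toList (by omega) hin
    · intro h
      refine Or.inr ⟨x.toList.length / 2 - 1 - 1, by omega, ?_⟩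
      rw [show x.toList.length - (x.toList.length / 2 - 1 - 1)
          = x.toList.length - (x.toList.length / 2 - 1) + 1 from by omega]
      exact h
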